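-- pv_equiv track=rewrite | github.com/di-uni/problem-solving | codility/Ex4_StrSymmetryPoint.py | solution
-- ===== SOURCE A (Python) =====
-- def solution(S):
--     if S == "" or len(S) % 2 == 0:
--         return -1
--
--     if len(S) == 1:
--         return 0
--
--     for i in range(len(S)//2):
--         if S[i] != S[-1-i]:
--             return -1
--
--     return len(S)//2
-- ===== SOURCE B (Python) =====
-- def solution(S):
--     if S == "" or len(S) % 2 == 0:
--         return -1
--     return len(S) // 2 if S == S[::-1] else -1
-- ===== Notes on version B (the rewrite author's own statement) =====
-- stated objective: simpler
-- what changed: Replaces the explicit half-length index loop with early exit (and the special length-1 case) by a single whole-string comparison against the reversed string S[::-1].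
import Mathlib
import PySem

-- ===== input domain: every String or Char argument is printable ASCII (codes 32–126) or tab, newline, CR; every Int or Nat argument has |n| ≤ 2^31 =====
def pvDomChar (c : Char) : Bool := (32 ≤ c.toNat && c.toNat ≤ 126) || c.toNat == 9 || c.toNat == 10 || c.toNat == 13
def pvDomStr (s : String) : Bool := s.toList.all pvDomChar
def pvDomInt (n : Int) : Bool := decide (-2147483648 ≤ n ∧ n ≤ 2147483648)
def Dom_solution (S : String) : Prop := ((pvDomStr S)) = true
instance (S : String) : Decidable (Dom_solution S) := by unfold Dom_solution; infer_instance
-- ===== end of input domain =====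

-- B replaces A's pairwise index loop (and its length-1 special case) by a single
-- whole-string comparison with the reversed string; objective: simpler.

-- ===== PORT A =====
-- the 'for i in range(len(S)//2)' loop with its early 'return -1'
def solutionGo (l : List Char) (i : Nat) : Int :=
  if _h : i < l.length / 2 then
    if PySem.List.pyGet? l (i : Int) ≠ PySem.List.pyGet? l (-1 - (i : Int)) then -1
    else solutionGo l (i + 1)
  else ((l.length / 2 : Nat) : Int)
termination_by l.length / 2 - i

def solution (S : String) : Int :=
  let l := S.toList
  if l = [] ∨ l.length % 2 = 0 then -1
  else if l.length = 1 then 0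
  else solutionGo l 0

-- ===== PORT B =====
def solution_alt (S : String) : Int :=
  let l := S.toList
  if l = [] ∨ l.length % 2 = 0 then -1
  else if l = l.reverse then ((l.length / 2 : Nat) : Int) else -1

-- ===== PRECONDITION & SPEC =====
def Spec_solution (S : String) (out : Int) : Prop := out = solution_alt S
instance (S : String) (out : Int) : Decidable (Spec_solution S out) := by unfold Spec_solution; infer_instance

-- ===== CLAIM (what is proved, stated in full; the proofs are below) =====
def Claim_equal_solution : Prop := ∀ (S : String), Dom_solution S → Spec_solution S (solution S)

-- ===== LEMMAS AND PROOFS =====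

-- A's loop returns len/2 iff every pair it inspects matches, else -1.
lemma solutionGo_spec (l : List Char) (i : Nat) :
    solutionGo l i =
      if ∀ j : Nat, i ≤ j → j < l.length / 2 → l[j]? = l[l.length - 1 - j]? then
        ((l.length / 2 : Nat) : Int) else -1 := by
  rw [solutionGo]
  by_cases h : i < l.length / 2
  · have hi1 : 0 < i + 1 := by omega
    have hi2 : i + 1 ≤ l.length := by omega
    have hneg : PySem.List.pyGet? l (-1 - (i : Int)) = l[l.length - (i + 1)]? := by
      have : (-1 - (i : Int)) = -((i + 1 : Nat) : Int) := by push_cast; ring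
      rw [this, PySem.List.pyGet?_neg_natCast _ _ hi1 hi2]
    simp only [dif_pos h, PySem.List.pyGet?_natCast, hneg]
    by_cases hm : l[i]? = l[l.length - (i + 1)]?
    · simp only [hm, ne_eq, not_true_eq_false, if_false]
      rw [solutionGo_spec l (i + 1)]
      congr 1
      · simp only [eq_iff_iff]
        constructor
        · intro hall j hij hj
          rcases Nat.lt_or_ge j (i + 1) with hji | hji
          · have hje : j = i := by omega
            subst hje
            have he : l.length - 1 - j = l.length - (j + 1) := by omega
            rw [he]; exact hm
          · exact hall j hji hj
        · intro hall j hij hj; exact hall j (by omega) hj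
    · simp only [hm, ne_eq, not_false_eq_true, if_true]
      have : ¬ (∀ j : Nat, i ≤ j → j < l.length / 2 → l[j]? = l[l.length - 1 - j]?) := by
        intro hall
        have := hall i le_rfl h
        have he : l.length - 1 - i = l.length - (i + 1) := by omega
        rw [he] at this
        exact hm this
      simp [this]
  · have : ∀ j : Nat, i ≤ j → j < l.length / 2 → l[j]? = l[l.length - 1 - j]? := by
      intro j hij hj; omega
    rw [dif_neg h, if_pos this]
termination_by l.length / 2 - i

-- matching on the first half is the same as being equal to the reverse
lemma half_pairs_iff_reverse (l : List Char) :
    (∀ j : Nat, 0 ≤ j → j < l.length / 2 → l[j]? = l[l.length - 1 - j]?) ↔ l = l.reverse := by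
  constructor
  · intro h
    apply List.ext_getElem?
    intro j
    by_cases hj : j < l.length
    · rw [List.getElem?_reverse hj]
      by_cases hlo : j < l.length / 2
      · exact h j (by omega) hlo
      · set k := l.length - 1 - j with hk
        by_cases hkj : k = j
        · rw [hkj]
        · have hk2 : k < l.length / 2 := by omega
          have := (h k (by omega) hk2).symm
          have he : l.length - 1 - k = j := by omega
          rwa [he] at this
    · rw [List.getElem?_eq_none (by simpa using Nat.le_of_not_lt hj),
          List.getElem?_eq_none (by simp; omega)]
  · intro h j _ hj
    have hjl : j < l.length := by omega
    conv_lhs => rw [h]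
    rw [List.getElem?_reverse hjl]

-- ===== VERDICT (by name: the statement is the Claim_ definition above) =====
theorem solution_spec : Claim_equal_solution := by
  intro S _
  unfold Spec_solution solution solution_alt
  set l := S.toList with hl
  by_cases hguard : l = [] ∨ l.length % 2 = 0
  · simp [hguard]
  · simp only [if_neg hguard]
    rw [not_or] at hguard
    obtain ⟨hne, hodd⟩ := hguard
    have hlen : 0 < l.length := List.length_pos_iff.mpr hne
    by_cases h1 : l.length = 1
    · -- length 1: A returns 0; a singleton equals its reverse, so B returns 1/2 = 0
      have hrev : l = l.reverse := by
        rcases l with _ | ⟨a, t⟩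
        · simp at hlen
        · have : t = [] := by simpa using h1
          simp [this]
      simp [h1, ← hrev]
    · simp only [if_neg h1, solutionGo_spec l 0]
      by_cases hr : l = l.reverse
      · rw [if_pos ((half_pairs_iff_reverse l).mpr hr), if_pos hr]
      · rw [if_neg (fun hc => hr ((half_pairs_iff_reverse l).mp hc)), if_neg hr]
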